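-- pv_equiv track=rewrite | github.com/baesh3744/algorithm-solutions | baekjoon/21000/21320_igorant_dp.py | get_cache
-- ===== SOURCE A (Python) =====
-- def get_cache(n: int) -> list[list[int]]:
--     cache: list[list[int]] = [[height for _ in range(2)] for height in range(n + 1)]
--     for height in range(2, n + 1):
--         # from root
--         cache[height][0] = cache[height - 1][0] + cache[height - 1][1]
--         # from leaf
--         cache[height][1] = cache[height - 1][0]
--         for sub_height in range(1, height - 1):
--             cache[height][1] += cache[sub_height][1]
--     return cache
-- ===== SOURCE B (Python) =====
-- def get_cache(n: int) -> list[list[int]]: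
--     if n < 0:
--         return []
--     cache = [[0, 0], [1, 1]][:n + 1]
--     ps = 0  # running sum of cache[s][1] for s = 1 .. h-2
--     for h in range(2, n + 1):
--         a, b = cache[-1]
--         cache.append([a + b, a + ps])
--         ps += b
--     return cache
-- ===== Notes on version B (the rewrite author's own statement) =====
-- stated objective: faster
-- what changed: B builds the table by appending rows while maintaining a running prefix sum of the [1]-entries, eliminating A's inner re-summing loop and its index mutation.
import Mathlib
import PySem

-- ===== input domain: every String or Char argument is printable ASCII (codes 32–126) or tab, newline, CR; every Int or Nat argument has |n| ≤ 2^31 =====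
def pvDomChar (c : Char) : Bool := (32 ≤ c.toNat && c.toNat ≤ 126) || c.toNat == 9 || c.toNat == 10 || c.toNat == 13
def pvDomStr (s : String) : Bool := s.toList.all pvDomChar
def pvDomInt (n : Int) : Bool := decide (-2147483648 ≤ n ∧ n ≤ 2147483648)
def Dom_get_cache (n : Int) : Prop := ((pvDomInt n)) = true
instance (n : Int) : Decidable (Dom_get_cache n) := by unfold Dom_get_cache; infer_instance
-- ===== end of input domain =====

-- B appends rows while keeping a running prefix sum, removing A's quadratic inner re-summing loop.

-- ===== PORT A =====
-- cache[i][j] read and in-place write, exactly as A performs them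
def getCell (cache : List (List Int)) (i j : Int) : Int :=
  PySem.List.pyGetD (PySem.List.pyGetD cache i []) j 0

def setCell (cache : List (List Int)) (i j : Int) (v : Int) : List (List Int) :=
  PySem.List.pySetD cache i (PySem.List.pySetD (PySem.List.pyGetD cache i []) j v)

def initA (n : Int) : List (List Int) :=
  (PySem.List.pyRange 0 (n + 1) 1).map
    (fun height => (PySem.List.pyRange 0 2 1).map (fun _ => height))

-- body of A's outer loop (the two writes, then the inner summing loop)
def stepA (cache : List (List Int)) (height : Int) : List (List Int) :=
  -- from root
  let cache := setCell cache height 0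
    (getCell cache (height - 1) 0 + getCell cache (height - 1) 1)
  -- from leaf
  let cache := setCell cache height 1 (getCell cache (height - 1) 0)
  (PySem.List.pyRange 1 (height - 1) 1).foldl (fun cache sub_height =>
    setCell cache height 1 (getCell cache height 1 + getCell cache sub_height 1)) cache

def get_cache (n : Int) : List (List Int) :=
  (PySem.List.pyRange 2 (n + 1) 1).foldl stepA (initA n)

-- ===== PORT B =====
-- body of B's loop: read cache[-1], append the new row, bump the prefix sum
def stepB (st : List (List Int) × Int) (_h : Int) : List (List Int) × Int :=
  let last := PySem.List.pyGetD st.1 (-1) []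
  let a := PySem.List.pyGetD last 0 0
  let b := PySem.List.pyGetD last 1 0
  (st.1 ++ [[a + b, a + st.2]], st.2 + b)

def get_cache_alt (n : Int) : List (List Int) :=
  if n < 0 then []
  else
    ((PySem.List.pyRange 2 (n + 1) 1).foldl stepB
      (PySem.List.slice [[0, 0], [1, 1]] none (some (n + 1)), 0)).1

-- ===== PRECONDITION & SPEC =====
def Spec_get_cache (n : Int) (out : List (List Int)) : Prop := out = get_cache_alt n
instance (n : Int) (out : List (List Int)) : Decidable (Spec_get_cache n out) := by unfold Spec_get_cache; infer_instance

-- ===== CLAIM (what is proved, stated in full; the proofs are below) =====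
def Claim_equal_get_cache : Prop := ∀ (n : Int), Dom_get_cache n → Spec_get_cache n (get_cache n)

-- ===== LEMMAS AND PROOFS =====

-- reference sequence: f h = (a h, b h, S (h-1)) for h ≥ 1, where S m = Σ_{s=1}^m b s
def f : Nat → Int × Int × Int
  | 0 => (0, 0, 0)
  | 1 => (1, 1, 0)
  | (h + 2) => ((f (h+1)).1 + (f (h+1)).2.1, (f (h+1)).1 + (f (h+1)).2.2,
                (f (h+1)).2.2 + (f (h+1)).2.1)

def pairAt (h : Nat) : List Int := if h = 0 then [0, 0] else [(f h).1, (f h).2.1]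

theorem f_succ (m : Nat) (h : 1 ≤ m) :
    f (m + 1) = ((f m).1 + (f m).2.1, (f m).1 + (f m).2.2, (f m).2.2 + (f m).2.1) := by
  obtain ⟨k, rfl⟩ := Nat.exists_eq_add_of_le h
  rw [Nat.add_comm 1 k]
  rfl

-- reading a cell in the left part of an append
theorem getCell_left (P rest : List (List Int)) (s j : Int) (h0 : 0 ≤ s)
    (h : s.toNat < P.length) :
    getCell (P ++ rest) s j = PySem.List.pyGetD (P[s.toNat]'h) j 0 := by
  unfold getCell
  rw [PySem.List.pyGetD_eq_getElem (P ++ rest) [] h0 (by simp; omega)]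
  congr 1
  exact List.getElem_append_left h

-- reading the row right at the split point
theorem getCell_split (P S : List (List Int)) (x : List Int) (j : Int) :
    getCell (P ++ x :: S) ((P.length : Nat) : Int) j = PySem.List.pyGetD x j 0 := by
  unfold getCell
  rw [PySem.List.pyGetD_natCast, List.getD_append_right _ _ _ _ (le_refl _),
    Nat.sub_self]
  rfl

-- writing the row right at the split point
theorem setCell_split (P S : List (List Int)) (x : List Int) (j v : Int) :
    setCell (P ++ x :: S) ((P.length : Nat) : Int) j v
      = P ++ (PySem.List.pySetD x j v) :: S := by
  unfold setCell
  rw [PySem.List.pyGetD_natCast, List.getD_append_right _ _ _ _ (le_refl _),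
    Nat.sub_self, PySem.List.pySetD_natCast]
  simp

-- A's inner loop: repeated 'cache[h][1] += cache[s][1]' is one write of the sum
theorem inner_loop (P S : List (List Int)) (u w : Int) (l : List Int)
    (hl : ∀ s ∈ l, 0 ≤ s ∧ s.toNat < P.length) :
    l.foldl (fun c s =>
        setCell c ((P.length : Nat) : Int) 1
          (getCell c ((P.length : Nat) : Int) 1 + getCell c s 1)) (P ++ [u, w] :: S)
      = P ++ [u, w + (l.map (fun s => PySem.List.pyGetD (P.getD s.toNat []) 1 0)).sum]
          :: S := by
  induction l generalizing w with
  | nil => simp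
  | cons s l ih =>
    obtain ⟨hs0, hsl⟩ := hl s (by simp)
    have e1 : getCell (P ++ [u, w] :: S) ((P.length : Nat) : Int) 1 = w := by
      rw [getCell_split]; rfl
    have e2 : getCell (P ++ [u, w] :: S) s 1
        = PySem.List.pyGetD (P.getD s.toNat []) 1 0 := by
      rw [getCell_left _ _ _ _ hs0 hsl, List.getD_eq_getElem _ _ hsl]
    rw [List.foldl_cons, e1, e2, setCell_split]
    have e3 : PySem.List.pySetD [u, w] 1 (w + PySem.List.pyGetD (P.getD s.toNat []) 1 0)
        = [u, w + PySem.List.pyGetD (P.getD s.toNat []) 1 0] := by rfl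
    rw [e3, ih _ (fun t ht => hl t (by simp [ht]))]
    simp [add_assoc]

-- sum of b-values over range(1, m) is the running prefix sum S(m-1)
theorem sumB (m : Nat) (h : 1 ≤ m) :
    ((PySem.List.pyRange 1 (m : Int) 1).map (fun s => (f s.toNat).2.1)).sum
      = (f m).2.2 := by
  induction m, h using Nat.le_induction with
  | base => rw [PySem.List.pyRange_one_eq_nil (by norm_num)]; rfl
  | succ m hm ih =>
    have hc : ((m + 1 : Nat) : Int) = (m : Int) + 1 := by push_cast; ring
    rw [hc, PySem.List.pyRange_one_succ_right (by exact_mod_cast hm)]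
    rw [List.map_append, List.sum_append, ih]
    simp only [List.map_cons, List.map_nil, List.sum_cons, List.sum_nil,
      Int.toNat_natCast, add_zero]
    rw [f_succ m hm]

-- one pass of A's outer loop turns the first diagonal row into pairAt (m+1)
theorem stepA_eq (P S : List (List Int)) (m : Nat) (hm : 1 ≤ m)
    (hPlen : P.length = m + 1)
    (hPm : ∀ (s : Nat) (hs : s < P.length), P[s]'hs = pairAt s) (x y : Int) :
    stepA (P ++ [x, y] :: S) ((m : Int) + 1) = P ++ pairAt (m + 1) :: S := by
  have hidx : ((m : Int) + 1) = ((P.length : Nat) : Int) := by rw [hPlen]; push_cast; ring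
  have hback : ((P.length : Nat) : Int) - 1 = ((m : Nat) : Int) := by
    rw [hPlen]; push_cast; ring
  have haM : ∀ rest j, getCell (P ++ rest) ((m : Nat) : Int) j
      = PySem.List.pyGetD (pairAt m) j 0 := by
    intro rest j
    rw [getCell_left P rest _ _ (by positivity) (by simp [hPlen])]
    simp only [Int.toNat_natCast]
    rw [hPm m (by omega)]
  have hpa : pairAt m = [(f m).1, (f m).2.1] := by rw [pairAt, if_neg (by omega)]
  simp only [stepA]
  rw [hidx, hback]
  rw [haM, haM, hpa]
  rw [show PySem.List.pyGetD [(f m).1, (f m).2.1] 0 0 = (f m).1 from rfl,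
    show PySem.List.pyGetD [(f m).1, (f m).2.1] 1 0 = (f m).2.1 from rfl]
  rw [setCell_split]
  rw [show PySem.List.pySetD [x, y] 0 ((f m).1 + (f m).2.1)
      = [(f m).1 + (f m).2.1, y] from rfl]
  rw [haM, hpa,
    show PySem.List.pyGetD [(f m).1, (f m).2.1] 0 0 = (f m).1 from rfl]
  rw [setCell_split]
  rw [show PySem.List.pySetD [(f m).1 + (f m).2.1, y] 1 (f m).1
      = [(f m).1 + (f m).2.1, (f m).1] from rfl]
  rw [inner_loop P S _ _ _ (by
    intro s hs
    rw [PySem.List.mem_pyRange_one] at hs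
    exact ⟨by omega, by rw [hPlen]; omega⟩)]
  have hsum : ((PySem.List.pyRange 1 ((m : Nat) : Int) 1).map
      (fun s => PySem.List.pyGetD (P.getD s.toNat []) 1 0)).sum = (f m).2.2 := by
    rw [← sumB m hm]
    apply congrArg
    apply List.map_congr_left
    intro s hs
    rw [PySem.List.mem_pyRange_one] at hs
    have hsn : s.toNat < P.length := by rw [hPlen]; omega
    rw [List.getD_eq_getElem _ _ hsn, hPm _ hsn, pairAt, if_neg (by omega)]
    rfl
  rw [hsum]
  rw [show [(f m).1 + (f m).2.1, (f m).1 + (f m).2.2] = pairAt (m + 1) by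
    rw [pairAt, if_neg (by omega), f_succ m hm]]

-- invariant of A's outer loop
theorem invA (n m : Nat) (h1 : 1 ≤ m) (h2 : m ≤ n) :
    (PySem.List.pyRange 2 ((m : Int) + 1) 1).foldl stepA (initA (n : Int))
      = (List.range (m + 1)).map pairAt
        ++ (PySem.List.pyRange ((m : Int) + 1) ((n : Int) + 1) 1).map
             (fun h => [h, h]) := by
  have hr2 : PySem.List.pyRange 0 2 1 = [0, 1] := by decide
  induction m, h1 using Nat.le_induction with
  | base =>
    rw [show ((1 : Nat) : Int) + 1 = 2 by norm_num,
      PySem.List.pyRange_one_eq_nil (le_refl 2), List.foldl_nil]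
    unfold initA
    rw [PySem.List.pyRange_one_append 0 2 ((n : Int) + 1) (by norm_num)
      (by exact_mod_cast by omega), List.map_append]
    have hfun : ∀ (L : List Int),
        L.map (fun height => (PySem.List.pyRange 0 2 1).map (fun _ => height))
          = L.map (fun h => [h, h]) := by
      intro L
      apply List.map_congr_left
      intro h _
      rw [hr2]
      rfl
    rw [hfun, hfun, hr2,
      show List.map pairAt (List.range (1 + 1)) = List.map (fun h => [h, h]) [0, 1] from
        by decide]
  | succ m hm ih =>
    have hmn : m ≤ n := le_trans (Nat.le_succ m) h2
    have hcast : ((m + 1 : Nat) : Int) + 1 = ((m : Int) + 1) + 1 := by push_cast; ring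
    rw [hcast,
      PySem.List.pyRange_one_succ_right (by exact_mod_cast Nat.succ_le_succ hm),
      List.foldl_append, ih hmn, List.foldl_cons, List.foldl_nil]
    rw [PySem.List.pyRange_one_cons (a := (m : Int) + 1) (by exact_mod_cast by omega),
      List.map_cons]
    rw [stepA_eq _ _ m hm (by simp) (by intro s hs; simp) _ _]
    simp [List.range_succ]

-- invariant of B's loop
theorem invB (n m : Nat) (h1 : 1 ≤ m) (h2 : m ≤ n) :
    (PySem.List.pyRange 2 ((m : Int) + 1) 1).foldl stepB
        (PySem.List.slice [[0, 0], [1, 1]] none (some ((n : Int) + 1)), 0)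
      = ((List.range (m + 1)).map pairAt, (f m).2.2) := by
  have hslice : PySem.List.slice ([[0, 0], [1, 1]] : List (List Int)) none
      (some ((n : Int) + 1)) = [[0, 0], [1, 1]] := by
    rw [PySem.List.slice_to _ (by omega)]
    exact List.take_of_length_le (by simp; omega)
  rw [hslice]
  induction m, h1 using Nat.le_induction with
  | base =>
    rw [show ((1 : Nat) : Int) + 1 = 2 by norm_num,
      PySem.List.pyRange_one_eq_nil (le_refl 2), List.foldl_nil]
    decide
  | succ m hm ih =>
    have hcast : ((m + 1 : Nat) : Int) + 1 = ((m : Int) + 1) + 1 := by push_cast; ring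
    rw [hcast, PySem.List.pyRange_one_succ_right (by exact_mod_cast Nat.succ_le_succ hm),
      List.foldl_append, ih (le_trans (Nat.le_succ m) h2), List.foldl_cons,
      List.foldl_nil]
    simp only [stepB]
    rw [show (List.range (m + 1)).map pairAt
        = (List.range m).map pairAt ++ [pairAt m] by
      rw [List.range_succ, List.map_append]; rfl]
    rw [PySem.List.pyGetD_neg_one_append_singleton]
    rw [show pairAt m = [(f m).1, (f m).2.1] from by rw [pairAt, if_neg (by omega)]]
    rw [show PySem.List.pyGetD [(f m).1, (f m).2.1] 0 0 = (f m).1 from rfl,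
      show PySem.List.pyGetD [(f m).1, (f m).2.1] 1 0 = (f m).2.1 from rfl]
    rw [f_succ m hm]
    simp [List.range_succ, pairAt, f_succ m hm]
    exact fun h => absurd h (by omega)

-- ===== VERDICT (by name: the statement is the Claim_ definition above) =====
theorem get_cache_spec : Claim_equal_get_cache := by
  intro n _
  unfold Spec_get_cache
  by_cases hneg : n < 0
  · unfold get_cache get_cache_alt initA
    rw [if_pos hneg,
      PySem.List.pyRange_one_eq_nil (a := 2) (b := n + 1) (by omega), List.foldl_nil,
      PySem.List.pyRange_one_eq_nil (a := 0) (b := n + 1) (by omega)]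
    rfl
  · by_cases h0 : n = 0
    · subst h0; decide
    · have h1 : 1 ≤ n.toNat := by omega
      have hn : n = ((n.toNat : Nat) : Int) := by omega
      rw [hn]
      unfold get_cache get_cache_alt
      rw [if_neg (by omega), invA n.toNat n.toNat h1 (le_refl _),
        invB n.toNat n.toNat h1 (le_refl _),
        PySem.List.pyRange_one_eq_nil (le_refl _)]
      simp
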